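-- pv_equiv track=rewrite | github.com/Thomas11411/Python-LeetCode | 2197-decode-the-slanted-ciphertext/2197-decode-the-slanted-ciphertext.py | decodeCiphertext
-- ===== SOURCE A (Python) =====
-- def decodeCiphertext(encodedText: str, rows: int) -> str:
--     cols = len(encodedText) // rows
--     res = []
--     for now in range(cols):
--         i , j = 0 , now
--         while (i * cols) + j < len(encodedText):
--             res.append(encodedText[(i * cols) + j])
--             i += 1
--             j += 1
--     return ''.join(res).rstrip()
-- ===== SOURCE B (Python) =====
-- def decodeCiphertext(encodedText: str, rows: int) -> str:
--     # each diagonal starting at column c is the constant-stride slice s[c::cols+1]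
--     cols = len(encodedText) // rows
--     return ''.join(encodedText[c::cols + 1] for c in range(cols)).rstrip()
-- ===== Notes on version B (the rewrite author's own statement) =====
-- stated objective: faster
-- what changed: replaces the inner two-pointer while loop with constant-stride slicing: each diagonal is exactly encodedText[c::cols+1], so B concatenates these slices over c in range(cols) (constant-factor: C-level slicing instead of per-character indexing/appending)
import Mathlib
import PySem

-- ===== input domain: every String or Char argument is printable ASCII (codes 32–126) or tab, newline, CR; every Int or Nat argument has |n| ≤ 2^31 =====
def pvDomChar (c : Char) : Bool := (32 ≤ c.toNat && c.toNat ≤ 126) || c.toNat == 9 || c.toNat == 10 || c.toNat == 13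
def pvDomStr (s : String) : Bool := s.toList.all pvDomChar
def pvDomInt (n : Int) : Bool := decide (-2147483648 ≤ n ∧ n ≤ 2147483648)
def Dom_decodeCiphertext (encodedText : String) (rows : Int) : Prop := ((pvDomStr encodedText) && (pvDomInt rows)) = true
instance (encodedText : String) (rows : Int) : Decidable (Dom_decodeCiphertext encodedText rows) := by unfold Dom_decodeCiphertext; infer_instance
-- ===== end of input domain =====

-- B decodes each diagonal as the constant-stride slice s[c::cols+1] instead of A's inner two-pointer while loop; return values proved equal whenever rows ≠ 0.


-- ===== PORT A =====
-- inner 'while (i*cols)+j < len(encodedText)' loop; fuel bounds the number of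
-- appends (each append consumes one fuel; fuel = len+1 never runs out on reached calls)
def pvAInner (s : List Char) (cols : Int) : Nat → Int → Int → List Char → List Char
  | 0, _, _, acc => acc
  | fuel + 1, i, j, acc =>
    if i * cols + j < (s.length : Int) then
      match PySem.List.pyGet? s (i * cols + j) with
      | some c => pvAInner s cols fuel (i + 1) (j + 1) (acc ++ [c])
      | none => acc
    else acc

def decodeCiphertext (encodedText : String) (rows : Int) : String :=
  let s := encodedText.toList
  let cols := PySem.Int.floordiv (s.length : Int) rows
  let res := (PySem.List.pyRange 0 cols 1).foldl
    (fun acc now => pvAInner s cols (s.length + 1) 0 now acc) []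
  String.ofList (PySem.Chars.rstrip res)

-- ===== PORT B =====
def decodeCiphertext_alt (encodedText : String) (rows : Int) : String :=
  let s := encodedText.toList
  let cols := PySem.Int.floordiv (s.length : Int) rows
  let res := (PySem.List.pyRange 0 cols 1).foldl
    (fun acc c => acc ++ (PySem.List.slice? s (some c) none (cols + 1)).getD []) []
  String.ofList (PySem.Chars.rstrip res)

-- ===== PRECONDITION & SPEC =====
-- Python raises ZeroDivisionError at rows = 0; nothing else raises.
def Pre_decodeCiphertext (encodedText : String) (rows : Int) : Prop := rows ≠ 0
instance (encodedText : String) (rows : Int) : Decidable (Pre_decodeCiphertext encodedText rows) := by unfold Pre_decodeCiphertext; infer_instance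
def pvWitness_decodeCiphertext : String × Int := ("ch   ie   pr", 3)

def Spec_decodeCiphertext (encodedText : String) (rows : Int) (out : String) : Prop := out = decodeCiphertext_alt encodedText rows
instance (encodedText : String) (rows : Int) (out : String) : Decidable (Spec_decodeCiphertext encodedText rows out) := by unfold Spec_decodeCiphertext; infer_instance

-- ===== CLAIM (what is proved, stated in full; the proofs are below) =====
def Claim_equal_decodeCiphertext : Prop := ∀ (encodedText : String) (rows : Int), Dom_decodeCiphertext encodedText rows → Pre_decodeCiphertext encodedText rows → Spec_decodeCiphertext encodedText rows (decodeCiphertext encodedText rows)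

-- ===== LEMMAS AND PROOFS =====

-- proof-side canonical form of one diagonal: every (d+1)-th element from idx on
def pvStrided (s : List Char) (d : Nat) (idx : Nat) : List Char :=
  if h : idx < s.length then s[idx] :: pvStrided s d (idx + d + 1) else []
termination_by s.length - idx

lemma pvStrided_of_ge (s : List Char) (d idx : Nat) (h : s.length ≤ idx) :
    pvStrided s d idx = [] := by
  rw [pvStrided]; simp [Nat.not_lt.mpr h]

lemma pvAInner_eq_strided (s : List Char) (cols : Int) (hc : 1 ≤ cols) :
    ∀ (fuel : Nat) (i j : Int) (acc : List Char), 0 ≤ i → 0 ≤ j →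
      (s.length : Int) - (i * cols + j) ≤ (fuel : Int) →
      pvAInner s cols fuel i j acc = acc ++ pvStrided s cols.toNat (i * cols + j).toNat := by
  intro fuel
  induction fuel with
  | zero =>
    intro i j acc hi hj hfuel
    rw [pvStrided_of_ge]
    · simp [pvAInner]
    · omega
  | succ n ih =>
    intro i j acc hi hj hfuel
    by_cases hlt : i * cols + j < (s.length : Int)
    · have hidx0 : 0 ≤ i * cols + j := by positivity
      have hidxlt : (i * cols + j).toNat < s.length := by omega
      have hget : PySem.List.pyGet? s (i * cols + j) = some (s[(i * cols + j).toNat]) := by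
        simp [PySem.List.pyGet?, PySem.List.pyIdx?, hidx0, hlt]
      rw [pvAInner, if_pos hlt, hget]
      dsimp only
      rw [ih (i + 1) (j + 1) (acc ++ [s[(i * cols + j).toNat]]) (by omega) (by omega)
          (by
            have h2 : (i + 1) * cols + (j + 1) = (i * cols + j) + (cols + 1) := by ring
            rw [h2]; push_cast at hfuel ⊢; omega)]
      have harg : ((i + 1) * cols + (j + 1)).toNat = (i * cols + j).toNat + cols.toNat + 1 := by
        have : (i + 1) * cols + (j + 1) = (i * cols + j) + cols + 1 := by ring
        omega
      rw [harg]
      conv_rhs => rw [pvStrided, dif_pos hidxlt]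
      simp
    · rw [pvAInner, if_neg hlt, pvStrided_of_ge]
      · simp
      · omega

-- the count-indexed comprehension that slice? produces is pvStrided, for the exact count
lemma pvFilterMap_eq_strided (s : List Char) (d : Nat) :
    ∀ (cnt idx : Nat), s.length ≤ idx + cnt * (d + 1) → idx + cnt * (d + 1) < s.length + (d + 1) →
      List.filterMap (fun k : Nat => s[((idx : Int) + ((d : Int) + 1) * (k : Int)).toNat]?)
        (List.range cnt) = pvStrided s d idx := by
  intro cnt
  induction cnt with
  | zero =>
    intro idx h1 _
    rw [pvStrided_of_ge s d idx (by omega)]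
    simp
  | succ m ih =>
    intro idx h1 h2
    have hsucc : (m + 1) * (d + 1) = m * (d + 1) + (d + 1) := by ring
    have hidx : idx < s.length := by omega
    rw [List.range_succ_eq_map, List.filterMap_cons]
    have hhead : s[((idx : Int) + ((d : Int) + 1) * ((0 : Nat) : Int)).toNat]? = some s[idx] := by
      have : ((idx : Int) + ((d : Int) + 1) * ((0 : Nat) : Int)).toNat = idx := by push_cast; omega
      rw [this, List.getElem?_eq_getElem hidx]
    rw [hhead, List.filterMap_map]
    have hfun : ((fun k : Nat => s[((idx : Int) + ((d : Int) + 1) * (k : Int)).toNat]?) ∘ Nat.succ)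
        = fun k : Nat => s[(((idx + d + 1 : Nat) : Int) + ((d : Int) + 1) * (k : Int)).toNat]? := by
      funext k
      simp only [Function.comp]
      congr 1
      push_cast
      ring_nf
    rw [hfun, ih (idx + d + 1) (by omega) (by omega)]
    conv_rhs => rw [pvStrided, dif_pos hidx]

lemma pvSlice_eq_strided (s : List Char) (d : Nat) (c : Nat) :
    (PySem.List.slice? s (some (c : Int)) none ((d : Int) + 1)).getD [] = pvStrided s d c := by
  have hd1 : (0 : Int) < (d : Int) + 1 := by omega
  unfold PySem.List.slice? PySem.List.sliceIndices
  simp only [if_neg (by omega : ¬ ((d : Int) + 1 = 0)), if_neg (by omega : ¬ ((d : Int) + 1 < 0)),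
    if_neg (by omega : ¬ ((c : Int) < 0)), if_pos hd1, Option.getD_some]
  by_cases hc : c < s.length
  · have hmin : min (c : Int) (s.length : Int) = (c : Int) := by omega
    rw [hmin, if_pos (by exact_mod_cast hc)]
    -- cnt = ((len - c + (d+1) - 1) / (d+1)).toNat; establish the two counting bounds and use the filterMap lemma
    set a : Int := (s.length : Int) - (c : Int) + ((d : Int) + 1) - 1 with ha
    have ha0 : 0 ≤ a := by omega
    set q : Int := a / ((d : Int) + 1) with hq
    have hq0 : 0 ≤ q := Int.ediv_nonneg ha0 (by omega)
    have hdm : ((d : Int) + 1) * q + a % ((d : Int) + 1) = a := by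
      rw [hq]; exact Int.mul_ediv_add_emod a ((d : Int) + 1)
    have hm0 : 0 ≤ a % ((d : Int) + 1) := Int.emod_nonneg a (by omega)
    have hm1 : a % ((d : Int) + 1) < (d : Int) + 1 := Int.emod_lt_of_pos a hd1
    have hcast : ((q.toNat * (d + 1) : Nat) : Int) = ((d : Int) + 1) * q := by
      push_cast [Int.toNat_of_nonneg hq0]; ring
    rw [pvFilterMap_eq_strided s d q.toNat c (by omega) (by omega)]
  · have hmin : min (c : Int) (s.length : Int) = (s.length : Int) := by omega
    rw [hmin, if_neg (by omega), pvStrided_of_ge s d c (by omega)]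
    simp

-- B's per-column slice equals A's inner while loop, for any column 0 ≤ now < cols
lemma pvColumn_eq (s : List Char) (cols : Int) (now : Int) (h0 : 0 ≤ now) (h1 : now < cols)
    (acc : List Char) :
    pvAInner s cols (s.length + 1) 0 now acc
      = acc ++ (PySem.List.slice? s (some now) none (cols + 1)).getD [] := by
  have hc : 1 ≤ cols := by omega
  have hnow : ((now.toNat : Nat) : Int) = now := Int.toNat_of_nonneg h0
  have hcols : ((cols.toNat : Nat) : Int) = cols := Int.toNat_of_nonneg (by omega)
  have hA := pvAInner_eq_strided s cols hc (s.length + 1) 0 now acc le_rfl h0 (by push_cast; omega)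
  have hB := pvSlice_eq_strided s cols.toNat now.toNat
  rw [hnow] at hB
  have : (cols.toNat : Int) + 1 = cols + 1 := by rw [hcols]
  rw [this] at hB
  rw [hA, hB]
  norm_num

-- ===== VERDICT =====
theorem decodeCiphertext_spec : Claim_equal_decodeCiphertext := by
  intro encodedText rows _ _
  unfold Spec_decodeCiphertext decodeCiphertext decodeCiphertext_alt
  dsimp only
  congr 1
  congr 1
  apply PySem.List.foldl_congr_mem
  intro acc now hmem
  rw [PySem.List.mem_pyRange_one] at hmem
  exact pvColumn_eq _ _ now hmem.1 hmem.2 acc
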